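-- pv_equiv track=rewrite | github.com/yonatan0476/Self.py | course_tasks.py | arrow
-- ===== SOURCE A (Python) =====
-- def arrow(my_char, max_length):
--     str = ""
--     for i in range(max_length):
--         str += (my_char + " ") * i + my_char + "\n"
--     for i in range(max_length - 1, 1, -1):
--         str += (my_char + " ") * (i - 1) + my_char + "\n"
--     if max_length > 0:
--         str += my_char
--     return str
-- ===== SOURCE B (Python) =====
-- def arrow(my_char, max_length):
--     if max_length <= 0:
--         return ""
--     master = (my_char + " ") * (max_length - 1) + my_char
--     unit = len(my_char) + 1
--     lines = [master]
--     for k in range(max_length - 1, 0, -1):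
--         line = master[:k * unit - 1]
--         lines = [line] + lines + [line]
--     return "\n".join(lines)
-- ===== Notes on version B (the rewrite author's own statement) =====
-- stated objective: alternative
-- what changed: B builds the widest line once and then wraps the picture outside-in, prepending and appending an ever-shorter prefix slice of that line around the accumulated middle, finally joining with newlines, instead of A's two directional repeat-and-concatenate loops plus a trailing-character conditional.
-- intended difference: For max_length == 1 A returns the tip line twice (my_char + '\n' + my_char) because its unconditional trailing += my_char duplicates the first loop's width-1 line, while B returns the single tip line my_char, the intended one-line arrow. — e.g. on arrow("*", 1): A returns "*\n*", B returns "*"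
import Mathlib
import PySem

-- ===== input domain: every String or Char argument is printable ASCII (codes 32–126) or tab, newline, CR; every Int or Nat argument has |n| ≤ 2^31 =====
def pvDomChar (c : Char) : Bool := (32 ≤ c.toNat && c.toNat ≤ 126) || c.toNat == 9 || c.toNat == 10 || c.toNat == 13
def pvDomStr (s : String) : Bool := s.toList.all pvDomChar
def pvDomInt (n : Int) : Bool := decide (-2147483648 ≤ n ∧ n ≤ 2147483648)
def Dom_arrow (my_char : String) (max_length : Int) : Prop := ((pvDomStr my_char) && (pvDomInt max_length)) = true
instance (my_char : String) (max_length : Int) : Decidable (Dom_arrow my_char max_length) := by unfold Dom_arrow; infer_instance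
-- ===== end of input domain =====

-- B builds the arrow recursively from the outside in, slicing each line as a prefix of the
-- widest line, instead of A's two directional concatenation loops (objective: alternative);
-- B intentionally returns a single tip line when max_length = 1 (see D_arrow).

-- ===== PORT A =====
-- literal port of A: two accumulating loops over ranges, then the conditional trailing char
def arrow (my_char : String) (max_length : Int) : String :=
  let c := my_char.toList
  let s1 : List Char := (PySem.List.pyRange 0 max_length 1).foldl
    (fun s i => s ++ (PySem.List.pyRepeat (c ++ [' ']) i ++ c ++ ['\n'])) []
  let s2 : List Char := (PySem.List.pyRange (max_length - 1) 1 (-1)).foldl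
    (fun s i => s ++ (PySem.List.pyRepeat (c ++ [' ']) (i - 1) ++ c ++ ['\n'])) s1
  let s3 := if max_length > 0 then s2 ++ c else s2
  String.ofList s3

-- ===== PORT B =====
-- literal port of B: widest line first, then wrap it on both sides with ever shorter
-- prefix slices of it, finally join with newlines
def arrow_alt (my_char : String) (max_length : Int) : String :=
  if max_length ≤ 0 then String.ofList []
  else
    let c := my_char.toList
    let master := PySem.List.pyRepeat (c ++ [' ']) (max_length - 1) ++ c
    let unit := c.length + 1
    let lines := (PySem.List.pyRange (max_length - 1) 0 (-1)).foldl
      (fun ls k =>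
        let line := PySem.List.slice master none (some (k * (unit : Int) - 1))
        [line] ++ ls ++ [line]) [master]
    String.ofList (PySem.Chars.join ['\n'] lines)

-- ===== PRECONDITION & SPEC =====
-- For max_length = 1, A returns the tip line twice (my_char ++ "\n" ++ my_char) because its
-- unconditional trailing += my_char duplicates the first loop's width-1 line, while B returns
-- the single tip line my_char, the intended one-line arrow.
def D_arrow (my_char : String) (max_length : Int) : Prop := max_length = 1
instance (my_char : String) (max_length : Int) : Decidable (D_arrow my_char max_length) := by unfold D_arrow; infer_instance

def Spec_arrow (my_char : String) (max_length : Int) (out : String) : Prop := ¬ D_arrow my_char max_length → out = arrow_alt my_char max_length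
instance (my_char : String) (max_length : Int) (out : String) : Decidable (Spec_arrow my_char max_length out) := by unfold Spec_arrow; infer_instance

def pvDiffWitness_arrow : String × Int := ("*", 1)
def pvDiffWitnessOut_arrow : String × String := ("*\n*", "*")

-- ===== CLAIM (what is proved, stated in full; the proofs are below) =====
def Claim_unchanged_arrow : Prop := ∀ (my_char : String) (max_length : Int), Dom_arrow my_char max_length → Spec_arrow my_char max_length (arrow my_char max_length)
def Claim_changed_arrow : Prop := Dom_arrow (pvDiffWitness_arrow.1) (pvDiffWitness_arrow.2) ∧ D_arrow (pvDiffWitness_arrow.1) (pvDiffWitness_arrow.2) ∧ arrow (pvDiffWitness_arrow.1) (pvDiffWitness_arrow.2) = pvDiffWitnessOut_arrow.1 ∧ arrow_alt (pvDiffWitness_arrow.1) (pvDiffWitness_arrow.2) = pvDiffWitnessOut_arrow.2 ∧ pvDiffWitnessOut_arrow.1 ≠ pvDiffWitnessOut_arrow.2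
def Claim_exact_arrow : Prop := ∀ (my_char : String) (max_length : Int), Dom_arrow my_char max_length → D_arrow my_char max_length → arrow my_char max_length ≠ arrow_alt my_char max_length

-- ===== LEMMAS AND PROOFS =====

-- A's line of width w: w-1 "char+space" units then the char
def pvBlk (c : List Char) (w : Int) : List Char := PySem.List.pyRepeat (c ++ [' ']) (w - 1) ++ c

-- taking m units plus a char off n units plus a char (m ≤ n)
lemma take_units (c u : List Char) (hu : u.length = c.length + 1)
    (hpre : u.take c.length = c) (m n : Nat) (h : m ≤ n) :
    ((List.replicate n u).flatten ++ c).take (m * (c.length + 1) + c.length) =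
      (List.replicate m u).flatten ++ c := by
  induction m generalizing n with
  | zero =>
    cases n with
    | zero => simp
    | succ n =>
      rw [List.replicate_succ, List.flatten_cons, List.append_assoc,
        List.take_append_of_le_length (by omega)]
      simp [hpre]
  | succ m ih =>
    cases n with
    | zero => omega
    | succ n =>
      have hm : m ≤ n := Nat.succ_le_succ_iff.mp h
      rw [List.replicate_succ, List.replicate_succ, List.flatten_cons, List.flatten_cons,
        List.append_assoc, List.append_assoc]
      have hi : (m + 1) * (c.length + 1) + c.length
          = u.length + (m * (c.length + 1) + c.length) := by rw [hu]; ring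
      rw [hi, List.take_append, List.take_of_length_le (Nat.le_add_right _ _),
        Nat.add_sub_cancel_left, ih n hm]

-- a prefix slice of the widest line is the width-k line
lemma slice_blk (c : List Char) (N k : Int) (h1 : 1 ≤ k) (hN : k ≤ N) :
    PySem.List.slice (pvBlk c N) none (some (k * ((c.length : Int) + 1) - 1)) = pvBlk c k := by
  have hb : (0 : Int) ≤ k * ((c.length : Int) + 1) - 1 := by nlinarith
  rw [PySem.List.slice_to _ hb]
  have hk : (k * ((c.length : Int) + 1) - 1).toNat = (k - 1).toNat * (c.length + 1) + c.length := by
    have : (k * ((c.length : Int) + 1) - 1) = (((k - 1).toNat * (c.length + 1) + c.length : Nat) : Int) := by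
      push_cast; rw [Int.toNat_of_nonneg (by omega)]; ring
    rw [this, Int.toNat_natCast]
  rw [hk]
  show (pvBlk c N).take _ = _
  unfold pvBlk
  rw [show PySem.List.pyRepeat (c ++ [' ']) (N - 1) = (List.replicate (N - 1).toNat (c ++ [' '])).flatten from rfl,
    show PySem.List.pyRepeat (c ++ [' ']) (k - 1) = (List.replicate (k - 1).toNat (c ++ [' '])).flatten from rfl]
  exact take_units c (c ++ [' ']) (by simp) (List.take_left' rfl) _ _ (by omega)

-- the wrap fold over the countdown b+1..N-1 produces the mirrored line list
lemma fold_lines (c : List Char) (N : Int) (hN : 1 ≤ N) : ∀ (b : Int), 0 ≤ b → b ≤ N - 1 →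
    (PySem.List.pyRange (N - 1) b (-1)).foldl
        (fun ls k =>
          let line := PySem.List.slice (pvBlk c N) none (some (k * ((c.length + 1 : Nat) : Int) - 1))
          [line] ++ ls ++ [line]) [pvBlk c N] =
      (PySem.List.pyRange (b + 1) N 1).map (pvBlk c) ++ [pvBlk c N] ++
        ((PySem.List.pyRange (b + 1) N 1).map (pvBlk c)).reverse := by
  intro b hb hbN
  induction hn : (N - 1 - b).toNat generalizing b with
  | zero =>
    have : b = N - 1 := by omega
    subst this
    rw [PySem.List.pyRange_neg_one_eq_nil (by omega),
      PySem.List.pyRange_one_eq_nil (by omega)]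
    simp
  | succ n ihn =>
    have hsplit : PySem.List.pyRange (N - 1) b (-1) =
        PySem.List.pyRange (N - 1) (b + 1) (-1) ++ [b + 1] := by
      rw [PySem.List.pyRange_neg_one_eq_reverse, PySem.List.pyRange_neg_one_eq_reverse,
        PySem.List.pyRange_one_cons (show b + 1 < N - 1 + 1 by omega), List.reverse_cons]
    rw [hsplit, List.foldl_append, ihn (b + 1) (by omega) (by omega) (by omega), List.foldl_cons,
      List.foldl_nil]
    have hline : PySem.List.slice (pvBlk c N) none (some ((b + 1) * ((c.length + 1 : Nat) : Int) - 1))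
        = pvBlk c (b + 1) := by
      rw [show (((c.length + 1 : Nat)) : Int) = (c.length : Int) + 1 by push_cast; ring]
      exact slice_blk c N (b + 1) (by omega) (by omega)
    simp only [hline]
    rw [PySem.List.pyRange_one_cons (show b + 1 < N by omega), List.map_cons, List.reverse_cons,
      show b + 1 + 1 = b + 1 + 1 from rfl]
    simp [List.append_assoc]

-- "\n".join with an explicit last element is a flatMap of newline-terminated pieces
lemma join_newline_last (ls : List (List Char)) (y : List Char) :
    PySem.Chars.join ['\n'] (ls ++ [y]) = ls.flatMap (fun x => x ++ ['\n']) ++ y := by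
  induction ls with
  | nil => simp [PySem.Chars.join_singleton]
  | cons x ls ih =>
    cases ls with
    | nil => simp [PySem.Chars.join_cons_cons, PySem.Chars.join_singleton]
    | cons a t =>
      rw [List.cons_append, List.cons_append, PySem.Chars.join_cons_cons,
        ← List.cons_append, ih]
      simp [List.append_assoc]

-- A's first loop, reindexed to widths 1..N
lemma a_first_loop (c : List Char) (N : Int) :
    (PySem.List.pyRange 0 N 1).flatMap
        (fun i => PySem.List.pyRepeat (c ++ [' ']) i ++ c ++ ['\n']) =
      (PySem.List.pyRange 1 (N + 1) 1).flatMap (fun w => pvBlk c w ++ ['\n']) := by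
  rw [PySem.List.pyRange_one 0 N, PySem.List.pyRange_one 1 (N + 1),
    show (N + 1 - 1).toNat = (N - 0).toNat by omega, List.flatMap_map, List.flatMap_map]
  apply List.flatMap_congr
  intro k _
  unfold pvBlk
  rw [show (1 : Int) + (k : Int) - 1 = 0 + (k : Int) by ring, List.append_assoc]

-- A's second loop body is the width-i line
lemma a_second_loop (c : List Char) (N : Int) :
    (PySem.List.pyRange (N - 1) 1 (-1)).flatMap
        (fun i => PySem.List.pyRepeat (c ++ [' ']) (i - 1) ++ c ++ ['\n']) =
      (PySem.List.pyRange (N - 1) 1 (-1)).flatMap (fun w => pvBlk c w ++ ['\n']) := by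
  apply List.flatMap_congr
  intro i _
  unfold pvBlk
  rw [List.append_assoc]

-- ===== VERDICT (by name: the statement is the Claim_ definition above) =====
theorem arrow_spec : Claim_unchanged_arrow := by
  intro my_char N _ hD
  unfold D_arrow at hD
  unfold arrow arrow_alt
  set c := my_char.toList with hc
  by_cases hN : N ≤ 0
  · have h1 : PySem.List.pyRange 0 N 1 = [] := PySem.List.pyRange_one_eq_nil (by omega)
    have h2 : PySem.List.pyRange (N - 1) 1 (-1) = [] := PySem.List.pyRange_neg_one_eq_nil (by omega)
    simp [h1, h2, if_neg (by omega : ¬ N > 0), if_pos hN]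
  · have hN2 : 2 ≤ N := by omega
    rw [if_neg hN]
    simp only
    rw [PySem.List.foldl_append_eq_flatMap, PySem.List.foldl_append_eq_flatMap, List.nil_append,
      if_pos (by omega : N > 0)]
    apply congrArg String.ofList
    have hmaster : PySem.List.pyRepeat (c ++ [' ']) (N - 1) ++ c = pvBlk c N := rfl
    rw [hmaster, fold_lines c N (by omega) 0 le_rfl (by omega),
      show (0 : Int) + 1 = 1 by ring]
    -- peel the innermost (width-1) line off the mirrored half
    rw [show (PySem.List.pyRange 1 N 1).map (pvBlk c)
          = pvBlk c 1 :: (PySem.List.pyRange 2 N 1).map (pvBlk c) by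
        rw [PySem.List.pyRange_one_cons (show (1 : Int) < N by omega)]; rfl]
    rw [List.reverse_cons]
    rw [show pvBlk c 1 :: (PySem.List.pyRange 2 N 1).map (pvBlk c)
          = (PySem.List.pyRange 1 N 1).map (pvBlk c) by
        rw [PySem.List.pyRange_one_cons (show (1 : Int) < N by omega)]; rfl]
    have hassoc : ∀ (x y z w : List (List Char)), (x ++ y) ++ (z ++ w) = ((x ++ y) ++ z) ++ w := by
      intros; simp [List.append_assoc]
    rw [hassoc, join_newline_last]
    -- A's two loops in width form
    rw [a_first_loop c N, a_second_loop c N]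
    -- split A's first range 1..N+1 into 1..N and [N]
    rw [show PySem.List.pyRange 1 (N + 1) 1 = PySem.List.pyRange 1 N 1 ++ [N] by
      rw [PySem.List.pyRange_one_append 1 N (N + 1) (by omega) (by omega),
        PySem.List.pyRange_one_singleton]]
    -- A's countdown N-1..2 is the ascending 2..N reversed
    rw [show PySem.List.pyRange (N - 1) 1 (-1) = (PySem.List.pyRange 2 N 1).reverse by
      rw [PySem.List.pyRange_neg_one_eq_reverse, show (1 : Int) + 1 = 2 by ring,
        show N - 1 + 1 = N by ring]]
    have hblk1 : pvBlk c 1 = c := by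
      unfold pvBlk
      rw [show (1 : Int) - 1 = 0 by ring,
        show PySem.List.pyRepeat (c ++ [' ']) (0 : Int) = [] from rfl, List.nil_append]
    rw [hblk1, List.flatMap_append, List.flatMap_append, List.flatMap_append,
      List.flatMap_cons, List.flatMap_nil]
    simp only [List.append_assoc, ← List.map_reverse, List.flatMap_map]
    simp [List.append_assoc]

theorem arrow_changed : Claim_changed_arrow := by unfold Claim_changed_arrow; decide

theorem arrow_tight : Claim_exact_arrow := by
  intro my_char N _ hD
  unfold D_arrow at hD
  subst hD
  unfold arrow arrow_alt
  set c := my_char.toList with hc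
  simp only
  rw [if_neg (by omega : ¬ (1 : Int) ≤ 0)]
  rw [show PySem.List.pyRange 0 1 1 = [0] from PySem.List.pyRange_one_singleton 0,
    show PySem.List.pyRange (1 - 1 : Int) 1 (-1) = [] from PySem.List.pyRange_neg_one_eq_nil (by omega)]
  simp only [List.foldl_cons, List.foldl_nil, List.nil_append, if_pos (by omega : (1 : Int) > 0)]
  rw [show PySem.List.pyRepeat (c ++ [' ']) 0 = [] from rfl, List.nil_append,
    show PySem.List.pyRange (1 - 1 : Int) 0 (-1) = [] from PySem.List.pyRange_neg_one_eq_nil (by omega),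
    List.foldl_nil,
    show PySem.List.pyRepeat (c ++ [' ']) ((1 : Int) - 1) = [] from rfl, List.nil_append,
    PySem.Chars.join_singleton]
  intro h
  have h2 : c ++ ['\n'] ++ c = c := by simpa using congrArg String.toList h
  have := congrArg List.length h2
  simp at this
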